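-- pv_equiv track=rewrite | github.com/Aiteta/AOC | 2023/day14.py | rollBoardSouth
-- ===== SOURCE A (Python) =====
-- def rollBoardSouth(board: list[list[str]]) -> list[list[str]]:
--     newBoard = [["."]* len(board[-1]) for _ in range(len(board))]
--     for i in range(len(board[-1])):
--         bottom =  len(board) - 1
--         for j in range(len(board) - 1, -1, -1):
--             if board[j][i] == "#":
--                 newBoard[j][i] = "#"
--                 bottom = j - 1
--             if board[j][i] == "O":
--                 newBoard[bottom][i] = "O"
--                 bottom -= 1
--     return newBoard
-- ===== SOURCE B (Python) =====
-- def rollBoardSouth(board: list[list[str]]) -> list[list[str]]: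
--     h = len(board)
--     w = len(board[-1])
--     cols = []
--     for i in range(w):
--         col = [board[j][i] for j in range(h)]
--         out = []
--         seg = []
--         for c in col:
--             if c == "#":
--                 k = seg.count("O")
--                 out += ["."] * (len(seg) - k) + ["O"] * k + ["#"]
--                 seg = []
--             else:
--                 seg.append(c)
--         k = seg.count("O")
--         out += ["."] * (len(seg) - k) + ["O"] * k
--         cols.append(out)
--     return [[cols[i][j] for i in range(w)] for j in range(h)]
-- ===== Notes on version B (the rewrite author's own statement) =====
-- stated objective: alternative
-- what changed: Replaces A's bottom-up running-bottom-pointer sweep writing into a preallocated grid with a top-down per-column pass that groups each column into wall-separated segments, counts the 'O's per segment and emits the segment as dots followed by packed 'O's, then reassembles the rows by transposition.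
import Mathlib
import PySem

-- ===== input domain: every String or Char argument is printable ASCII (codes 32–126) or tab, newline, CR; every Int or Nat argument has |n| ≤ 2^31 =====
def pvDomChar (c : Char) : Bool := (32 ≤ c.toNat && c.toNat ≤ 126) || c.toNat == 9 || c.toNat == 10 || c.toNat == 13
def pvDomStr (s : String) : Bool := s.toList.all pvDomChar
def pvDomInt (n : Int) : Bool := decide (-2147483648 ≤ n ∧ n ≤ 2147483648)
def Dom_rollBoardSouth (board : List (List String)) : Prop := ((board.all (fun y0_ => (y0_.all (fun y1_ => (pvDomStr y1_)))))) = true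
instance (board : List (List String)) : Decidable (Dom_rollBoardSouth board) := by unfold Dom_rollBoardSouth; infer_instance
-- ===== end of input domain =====

-- B replaces A's bottom-up running-pointer sweep by a top-down per-column segment
-- grouping (count the 'O's of each wall-free run, emit dots then packed 'O's) and a
-- final transposition; same asymptotic cost (objective: alternative).

-- ===== PORT A =====
-- xs[k] = v on a list, Int index: in range writes, otherwise unchanged (writes in A
-- are always in range on inputs where the Python returns).
def setAt {α : Type} (l : List α) (k : Int) (v : α) : List α :=
  if 0 ≤ k ∧ k < (l.length : Int) then l.set k.toNat v else l

-- newBoard[j][i] = v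
def set2 (g : List (List String)) (j i : Int) (v : String) : List (List String) :=
  if 0 ≤ j ∧ j < (g.length : Int) then g.set j.toNat (setAt (g.getD j.toNat []) i v) else g

-- body of A's inner loop over j (state: (newBoard, bottom))
def innerStep (board : List (List String)) (i : Int)
    (st : List (List String) × Int) (j : Int) : List (List String) × Int :=
  let cell := PySem.List.pyGetD (PySem.List.pyGetD board j []) i ""
  let st1 := if cell = "#" then (set2 st.1 j i "#", j - 1) else st
  if cell = "O" then (set2 st1.1 st1.2 i "O", st1.2 - 1) else st1

def rollBoardSouth (board : List (List String)) : List (List String) :=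
  let w := (PySem.List.pyGetD board (-1) []).length
  let h := board.length
  let newBoard := List.replicate h (List.replicate w ("." : String))
  (PySem.List.pyRange 0 (w : Int) 1).foldl
    (fun nb i =>
      ((PySem.List.pyRange ((h : Int) - 1) (-1) (-1)).foldl (innerStep board i)
        (nb, (h : Int) - 1)).1)
    newBoard

-- ===== PORT B =====
-- a segment without walls: the '.'s, then the packed 'O's
def fillSeg (seg : List String) : List String :=
  let k := seg.count "O"
  List.replicate (seg.length - k) "." ++ List.replicate k "O"

-- roll one column: scan top-down, flush the accumulated segment at each wall
def colRoll (col : List String) : List String :=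
  let p := col.foldl
    (fun (st : List String × List String) c =>
      if c = "#" then (st.1 ++ fillSeg st.2 ++ ["#"], [])
      else (st.1, st.2 ++ [c]))
    ([], [])
  p.1 ++ fillSeg p.2

def rollBoardSouth_alt (board : List (List String)) : List (List String) :=
  let h := board.length
  let w := (PySem.List.pyGetD board (-1) []).length
  let cols := (List.range w).map (fun (i : Nat) =>
    colRoll ((List.range h).map (fun (j : Nat) =>
      PySem.List.pyGetD (PySem.List.pyGetD board (j : Int) []) (i : Int) "")))
  (List.range h).map (fun (j : Nat) =>
    (List.range w).map (fun (i : Nat) =>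
      PySem.List.pyGetD (PySem.List.pyGetD cols (i : Int) []) (j : Int) ""))

-- ===== PRECONDITION & SPEC =====
-- Pre_ excludes exactly the inputs where the Python A raises: the empty board
-- (board[-1] IndexError) and ragged boards with a row shorter than the last row
-- (board[j][i] IndexError).
def Pre_rollBoardSouth (board : List (List String)) : Prop :=
  board ≠ [] ∧ ∀ row ∈ board, (board.getLastD []).length ≤ row.length

instance (board : List (List String)) : Decidable (Pre_rollBoardSouth board) := by
  unfold Pre_rollBoardSouth; infer_instance

def pvWitness_rollBoardSouth : List (List String) :=
  [["O", ".", "#"], [".", "O", "."]]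

def Spec_rollBoardSouth (board : List (List String)) (out : List (List String)) : Prop :=
  out = rollBoardSouth_alt board
instance (board : List (List String)) (out : List (List String)) :
    Decidable (Spec_rollBoardSouth board out) := by unfold Spec_rollBoardSouth; infer_instance

-- ===== CLAIM (what is proved, stated in full; the proofs are below) =====
def Claim_equal_rollBoardSouth : Prop := ∀ (board : List (List String)),
  Dom_rollBoardSouth board → Pre_rollBoardSouth board →
    Spec_rollBoardSouth board (rollBoardSouth board)


-- ===== LEMMAS AND PROOFS =====

-- ---- generic list helpers ----

theorem setAt_length {α : Type} (l : List α) (k : Int) (v : α) :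
    (setAt l k v).length = l.length := by
  unfold setAt; split <;> simp

theorem setAt_setAt {α : Type} (l : List α) (k : Int) (a b : α) :
    setAt (setAt l k a) k b = setAt l k b := by
  unfold setAt
  by_cases h : 0 ≤ k ∧ k < (l.length : Int)
  · simp [h, List.set_set]
  · simp [h]

theorem set_replicate_append {α : Type} (n : Nat) (a b : α) (l : List α) :
    (List.replicate (n+1) a ++ l).set n b = List.replicate n a ++ b :: l := by
  induction n with
  | zero => simp
  | succ m ih => simpa [List.replicate_succ] using ih

-- ---- the 1-D abstraction of A's inner loop ----

def writeCol (g : List (List String)) (i : Int) (r : List String) : List (List String) :=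
  List.zipWith (fun row v => setAt row i v) g r

def stepAbs (board : List (List String)) (i : Int)
    (st : List String × Int) (j : Int) : List String × Int :=
  let cell := PySem.List.pyGetD (PySem.List.pyGetD board j []) i ""
  let st1 := if cell = "#" then (setAt st.1 j "#", j - 1) else st
  if cell = "O" then (setAt st1.1 st1.2 "O", st1.2 - 1) else st1

theorem stepAbs_length (board : List (List String)) (i : Int)
    (st : List String × Int) (j : Int) :
    ((stepAbs board i st j).1).length = st.1.length := by
  simp only [stepAbs]
  split_ifs <;> simp [setAt_length]

theorem writeCol_length (g : List (List String)) (i : Int) (r : List String) :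
    (writeCol g i r).length = min g.length r.length := by
  simp [writeCol]

theorem set2_writeCol (G : List (List String)) (i : Int) (r : List String)
    (hlen : r.length = G.length) (j : Int) (v : String) :
    set2 (writeCol G i r) j i v = writeCol G i (setAt r j v) := by
  have hWlen : (writeCol G i r).length = G.length := by
    simp [writeCol_length, hlen]
  by_cases hj : 0 ≤ j ∧ j < (G.length : Int)
  · have hjG : j.toNat < G.length := by omega
    have hjr : j.toNat < r.length := by omega
    have hsetr : setAt r j v = r.set j.toNat v := by
      unfold setAt; rw [if_pos (by omega)]
    rw [hsetr]
    unfold set2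
    rw [if_pos (by rw [hWlen]; exact hj)]
    have hget : (writeCol G i r).getD j.toNat [] = setAt G[j.toNat] i r[j.toNat] := by
      rw [List.getD_eq_getElem _ _ (by rw [hWlen]; exact hjG)]
      simp [writeCol]
    rw [hget, setAt_setAt]
    apply List.ext_getElem
    · simp [writeCol_length, hlen]
    · intro m hm1 hm2
      have hmG : m < G.length := by
        have := hm2; rw [writeCol_length] at this; omega
      have hmr : m < r.length := by omega
      simp only [writeCol, List.getElem_set, List.getElem_zipWith]
      by_cases hmj : j.toNat = m
      · subst hmj; simp
      · simp [hmj]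
  · have h1 : setAt r j v = r := by
      unfold setAt; rw [if_neg (by omega)]
    unfold set2
    rw [if_neg (by rw [hWlen]; exact hj), h1]

theorem innerStep_writeCol (board : List (List String)) (i : Int)
    (G : List (List String)) (r : List String) (b : Int)
    (hlen : r.length = G.length) (j : Int) :
    innerStep board i (writeCol G i r, b) j =
      (writeCol G i (stepAbs board i (r, b) j).1, (stepAbs board i (r, b) j).2) := by
  unfold innerStep stepAbs
  by_cases h1 : PySem.List.pyGetD (PySem.List.pyGetD board j []) i "" = "#" <;>
    by_cases h2 : PySem.List.pyGetD (PySem.List.pyGetD board j []) i "" = "O" <;>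
      simp [h1, h2, set2_writeCol, hlen]

theorem lens (board : List (List String)) (i : Int) :
    ∀ (l : List Int) (G : List (List String)) (r : List String) (b : Int),
      r.length = G.length →
      l.foldl (innerStep board i) (writeCol G i r, b) =
        (writeCol G i (l.foldl (stepAbs board i) (r, b)).1,
         (l.foldl (stepAbs board i) (r, b)).2) := by
  intro l
  induction l with
  | nil => intro G r b _; simp
  | cons j t ih =>
    intro G r b hlen
    have hstep := innerStep_writeCol board i G r b hlen j
    have hlen' : ((stepAbs board i (r, b) j).1).length = G.length := by
      rw [stepAbs_length]; exact hlen
    simp only [List.foldl_cons, hstep]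
    exact ih G _ _ hlen'

-- ---- descending index lists ----

def idxDesc (k n : Nat) : List Int := ((List.range' k n).map (fun m => (m : Int))).reverse

theorem idxDesc_succ (k n : Nat) :
    idxDesc k (n+1) = idxDesc (k+1) n ++ [(k : Int)] := by
  simp [idxDesc, List.range'_succ]

theorem descEq (h : Nat) :
    PySem.List.pyRange ((h : Int) - 1) (-1) (-1) = idxDesc 0 h := by
  rw [PySem.List.pyRange_neg_one_eq_reverse]
  simp [idxDesc, PySem.List.pyRange_one, ← List.range_eq_range']
  exact List.map_eq_flatMap

-- ---- B's column function, recursion form ----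

def segA : List String → List String → List String
  | seg, [] => fillSeg seg
  | seg, x :: t => if x = "#" then fillSeg seg ++ "#" :: segA [] t else segA (seg ++ [x]) t

def segTail : List String → List String
  | [] => []
  | _ :: r => "#" :: segA [] r

def wallFree (x : String) : Bool := x != "#"

def topdots (s : List String) : Int :=
  ((s.takeWhile wallFree).length : Int) - ((s.takeWhile wallFree).count "O" : Int)

theorem fillSeg_length (s : List String) : (fillSeg s).length = s.length := by
  have := List.count_le_length (a := "O") (l := s)
  simp [fillSeg]; omega

theorem segA_length : ∀ (c seg : List String), (segA seg c).length = seg.length + c.length := by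
  intro c
  induction c with
  | nil => intro seg; simp [segA, fillSeg_length]
  | cons x t ih =>
    intro seg
    by_cases h : x = "#"
    · simp [segA, h, fillSeg_length, ih]
    · simp [segA, h, ih]
      omega

theorem segA_eq : ∀ (c seg : List String),
    segA seg c = fillSeg (seg ++ c.takeWhile wallFree) ++ segTail (c.dropWhile wallFree) := by
  intro c
  induction c with
  | nil => intro seg; simp [segA, segTail]
  | cons x t ih =>
    intro seg
    by_cases h : x = "#"
    · simp [segA, h, segTail, wallFree]
    · simp only [segA, h, if_neg, not_false_iff, ih, List.takeWhile_cons, List.dropWhile_cons,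
        wallFree]
      simp [h]


-- ---- fillSeg / topdots arithmetic ----

theorem fillSeg_cons_O (s : List String) :
    fillSeg ("O" :: s) =
      List.replicate (s.length - s.count "O") "." ++ "O" :: List.replicate (s.count "O") "O" := by
  unfold fillSeg
  simp [List.replicate_succ, Nat.succ_sub_succ]

theorem fillSeg_cons_dot (y : String) (s : List String) (hO : y ≠ "O") :
    fillSeg (y :: s) = "." :: fillSeg s := by
  have hc : (y :: s).count "O" = s.count "O" := by
    simp [hO]
  have hle := List.count_le_length (a := "O") (l := s)
  simp only [fillSeg]
  rw [hc, List.length_cons]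
  have h1 : s.length + 1 - s.count "O" = (s.length - s.count "O") + 1 := by omega
  rw [h1, List.replicate_succ]
  simp

theorem topdots_sharp (s : List String) : topdots ("#" :: s) = 0 := by
  simp [topdots, wallFree]

theorem topdots_O (s : List String) : topdots ("O" :: s) = topdots s := by
  simp [topdots, wallFree]

theorem topdots_other (y : String) (s : List String) (hS : y ≠ "#") (hO : y ≠ "O") :
    topdots (y :: s) = topdots s + 1 := by
  simp [topdots, wallFree, hS, hO]
  ring

theorem topdots_eq (s : List String) :
    topdots s =
      (((s.takeWhile wallFree).length - (s.takeWhile wallFree).count "O" : Nat) : Int) := by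
  unfold topdots
  rw [Nat.cast_sub (List.count_le_length)]

-- ---- the 1-D loop, column-local ----

def step1 (c : List String) (st : List String × Int) (j : Int) : List String × Int :=
  let cell := PySem.List.pyGetD c j ""
  let st1 := if cell = "#" then (setAt st.1 j "#", j - 1) else st
  if cell = "O" then (setAt st1.1 st1.2 "O", st1.2 - 1) else st1

theorem mainCol (c : List String) : ∀ (s pre : List String), c = pre ++ s →
    (idxDesc pre.length s.length).foldl (step1 c)
        (List.replicate c.length ".", (c.length : Int) - 1)
    = (List.replicate pre.length "." ++ segA [] s,
       (pre.length : Int) + topdots s - 1) := by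
  intro s
  induction s with
  | nil =>
    intro pre hc
    subst hc
    simp [idxDesc, segA, fillSeg, topdots]
  | cons y s' ih =>
    intro pre hc
    have hc' : c = (pre ++ [y]) ++ s' := by simpa [List.append_assoc] using hc
    have ihy := ih (pre ++ [y]) hc'
    rw [List.length_append, List.length_singleton] at ihy
    rw [List.length_cons, idxDesc_succ, List.foldl_append, ihy]
    simp only [List.foldl_cons, List.foldl_nil]
    have hcell : PySem.List.pyGetD c (pre.length : Int) "" = y := by
      subst hc
      rw [PySem.List.pyGetD_natCast]
      rw [List.getD_eq_getElem _ _ (by simp)]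
      rw [List.getElem_append_right (le_refl _)]
      simp
    have hsegl : (segA [] s').length = s'.length := by
      rw [segA_length]; simp
    by_cases hS : y = "#"
    · have hO : y ≠ "O" := by rw [hS]; decide
      simp only [step1, hcell, if_pos hS, if_neg hO]
      refine Prod.ext ?_ ?_
      · show setAt (List.replicate (pre.length + 1) "." ++ segA [] s') (pre.length : Int) "#" = _
        unfold setAt
        rw [if_pos (by simp [hsegl]; omega)]
        rw [Int.toNat_natCast, set_replicate_append]
        simp [hS, segA, fillSeg]
      · show (pre.length : Int) - 1 = _
        rw [hS, topdots_sharp]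
        ring
    · by_cases hO : y = "O"
      · -- rolled rock: lands on the last free '.' of the current top segment
        simp only [step1, hcell, if_neg hS, if_pos hO]
        have htd := topdots_eq s'
        set tw := s'.takeWhile wallFree with htw
        set dn : Nat := tw.length - tw.count "O" with hdn
        have hcnt : tw.count "O" ≤ tw.length := List.count_le_length
        have hfill : fillSeg tw = List.replicate dn "." ++ List.replicate (tw.count "O") "O" := by
          rw [hdn]; rfl
        have hsegA : segA [] s' = fillSeg tw ++ segTail (s'.dropWhile wallFree) := by
          rw [segA_eq]; simp [htw]
        have hb : (((pre.length + 1 : Nat)) : Int) + topdots s' - 1 = ((pre.length + dn : Nat) : Int) := by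
          rw [htd]; push_cast; ring
        refine Prod.ext ?_ ?_
        · show setAt (List.replicate (pre.length + 1) "." ++ segA [] s')
              ((((pre.length + 1 : Nat)) : Int) + topdots s' - 1) "O" = _
          rw [hb, hsegA, hfill]
          rw [← List.append_assoc, ← List.append_assoc, ← List.replicate_add]
          rw [List.append_assoc]
          have harr : pre.length + 1 + dn = (pre.length + dn) + 1 := by omega
          rw [harr]
          unfold setAt
          rw [if_pos (by constructor <;> [positivity; (simp; omega)])]
          rw [Int.toNat_natCast, set_replicate_append]
          have h1 : segA [] ("O" :: s') = segA ["O"] s' := by simp [segA]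
          have h2 : segA ["O"] s' = fillSeg ("O" :: tw) ++ segTail (s'.dropWhile wallFree) := by
            rw [segA_eq]; simp [htw]
          have h3 : fillSeg ("O" :: tw) = List.replicate dn "." ++ "O" :: List.replicate (tw.count "O") "O" := by
            rw [fillSeg_cons_O, ← hdn]
          rw [hO, h1, h2, h3]
          simp only [List.cons_append, List.append_assoc]
          rw [List.replicate_add, List.append_assoc]
        · show (((pre.length + 1 : Nat)) : Int) + topdots s' - 1 - 1 = _
          rw [hO, topdots_O, htd]
          push_cast; ring
      · simp only [step1, hcell, if_neg hS, if_neg hO]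
        refine Prod.ext ?_ ?_
        · show List.replicate (pre.length + 1) "." ++ segA [] s' = _
          have h1 : segA [] (y :: s') = segA [y] s' := by simp [segA, hS]
          have h2 : segA [y] s' = fillSeg (y :: s'.takeWhile wallFree) ++ segTail (s'.dropWhile wallFree) := by
            rw [segA_eq]; simp
          have h3 : segA [] s' = fillSeg (s'.takeWhile wallFree) ++ segTail (s'.dropWhile wallFree) := by
            rw [segA_eq]; simp
          rw [h1, h2, h3, fillSeg_cons_dot _ _ hO, List.replicate_succ']
          simp [List.append_assoc]
        · show (((pre.length + 1 : Nat)) : Int) + topdots s' - 1 = _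
          rw [topdots_other y s' hS hO]
          push_cast; ring


-- ---- column extraction and the per-column result ----

def extractCol (board : List (List String)) (i : Nat) : List String :=
  (List.range board.length).map (fun (j : Nat) =>
    PySem.List.pyGetD (PySem.List.pyGetD board (j : Int) []) (i : Int) "")

theorem extractCol_length (board : List (List String)) (i : Nat) :
    (extractCol board i).length = board.length := by simp [extractCol]

theorem mem_idxDesc (j : Int) (h : Nat) (hj : j ∈ idxDesc 0 h) :
    ∃ jn : Nat, jn < h ∧ j = (jn : Int) := by
  simp [idxDesc, ← List.range_eq_range', List.mem_range] at hj
  obtain ⟨jn, h1, h2⟩ := hj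
  exact ⟨jn, h1, h2⟩

theorem read_bridge (board : List (List String)) (iN : Nat) (j : Int)
    (hj : j ∈ idxDesc 0 board.length) :
    PySem.List.pyGetD (extractCol board iN) j "" =
      PySem.List.pyGetD (PySem.List.pyGetD board j []) (iN : Int) "" := by
  obtain ⟨jn, hlt, rfl⟩ := mem_idxDesc j board.length hj
  rw [PySem.List.pyGetD_natCast]
  rw [List.getD_eq_getElem _ _ (by simp [extractCol_length]; omega)]
  simp only [extractCol, List.getElem_map, List.getElem_range]

def resCol (board : List (List String)) (i : Nat) : List String :=
  segA [] (extractCol board i)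

theorem resCol_length (board : List (List String)) (i : Nat) :
    (resCol board i).length = board.length := by
  rw [resCol, segA_length]; simp [extractCol_length]

def gPart (board : List (List String)) (w n : Nat) : List (List String) :=
  (List.range board.length).map (fun j =>
    (List.range w).map (fun i => if i < n then (resCol board i).getD j "" else "."))

theorem gPart_length (board : List (List String)) (w n : Nat) :
    (gPart board w n).length = board.length := by simp [gPart]

theorem gPart_start (board : List (List String)) (w n : Nat) (hn : n < w) :
    gPart board w n =
      writeCol (gPart board w n) (n : Int) (List.replicate board.length ".") := by
  apply List.ext_getElem
  · simp [writeCol_length, gPart_length]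
  · intro m hm1 hm2
    have hmb : m < board.length := by
      have := hm1; rw [gPart_length] at this; exact this
    simp only [writeCol, List.getElem_zipWith, List.getElem_replicate]
    simp only [gPart, List.getElem_map, List.getElem_range]
    unfold setAt
    rw [if_pos (by simp; omega)]
    simp only [Int.toNat_natCast]
    apply List.ext_getElem
    · simp
    · intro p hp1 hp2
      have hpw : p < w := by simpa using hp1
      rw [List.getElem_set]
      simp only [List.getElem_map, List.getElem_range]
      by_cases hpn : n = p
      · subst hpn; simp
      · simp [hpn]

theorem writeCol_gPart (board : List (List String)) (w n : Nat) (hn : n < w) :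
    writeCol (gPart board w n) (n : Int) (resCol board n) = gPart board w (n + 1) := by
  apply List.ext_getElem
  · simp [writeCol_length, gPart_length, resCol_length]
  · intro m hm1 hm2
    have hmb : m < board.length := by
      have := hm2; rw [gPart_length] at this; exact this
    simp only [writeCol, List.getElem_zipWith]
    simp only [gPart, List.getElem_map, List.getElem_range]
    unfold setAt
    rw [if_pos (by simp; omega)]
    simp only [Int.toNat_natCast]
    apply List.ext_getElem
    · simp
    · intro p hp1 hp2
      have hpw : p < w := by simpa using hp1
      rw [List.getElem_set]
      simp only [List.getElem_map, List.getElem_range]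
      by_cases hpn : n = p
      · subst hpn
        have hml : m < (resCol board n).length := by rw [resCol_length]; omega
        simp [List.getD, List.getElem?_eq_getElem hml]
      · by_cases hlt : p < n
        · simp [hpn, hlt, Nat.lt_succ_of_lt hlt]
        · have : ¬ p < n + 1 := by omega
          simp [hpn, hlt, this]

theorem colStep (board : List (List String)) (w n : Nat) (hn : n < w) :
    ((PySem.List.pyRange ((board.length : Int) - 1) (-1) (-1)).foldl
        (innerStep board (n : Int)) (gPart board w n, (board.length : Int) - 1)).1
      = gPart board w (n + 1) := by
  conv_lhs => rw [gPart_start board w n hn]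
  rw [lens board (n : Int) _ (gPart board w n) (List.replicate board.length ".")
    ((board.length : Int) - 1) (by simp [gPart_length])]
  rw [descEq]
  rw [PySem.List.foldl_congr_mem _ (stepAbs board (n : Int)) (step1 (extractCol board n)) _
    (by
      intro acc x hx
      simp only [step1, stepAbs, read_bridge board n x hx])]
  have hml := mainCol (extractCol board n) (extractCol board n) [] (by simp)
  rw [List.length_nil, extractCol_length] at hml
  rw [hml]
  simp only [List.replicate_zero, List.nil_append]
  exact writeCol_gPart board w n hn

theorem gPart_zero (board : List (List String)) (w : Nat) :
    gPart board w 0 = List.replicate board.length (List.replicate w ".") := by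
  apply List.ext_getElem
  · simp [gPart]
  · intro m hm1 hm2
    simp [gPart, List.map_const']

theorem outerFold (board : List (List String)) (w : Nat) : ∀ n, n ≤ w →
    (((List.range n).map (fun (k : Nat) => (k : Int))).foldl
      (fun nb i =>
        ((PySem.List.pyRange ((board.length : Int) - 1) (-1) (-1)).foldl (innerStep board i)
          (nb, (board.length : Int) - 1)).1)
      (gPart board w 0)) = gPart board w n := by
  intro n
  induction n with
  | zero => intro _; simp
  | succ m ih =>
    intro hm
    rw [List.range_succ, List.map_append, List.foldl_append, ih (by omega)]
    simp only [List.map_cons, List.map_nil, List.foldl_cons, List.foldl_nil]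
    exact colStep board w m (by omega)

-- ---- B's side ----

theorem colRoll_aux : ∀ (c out seg : List String),
    (c.foldl (fun (st : List String × List String) c' =>
        if c' = "#" then (st.1 ++ fillSeg st.2 ++ ["#"], []) else (st.1, st.2 ++ [c']))
      (out, seg)).1
      ++ fillSeg ((c.foldl (fun (st : List String × List String) c' =>
        if c' = "#" then (st.1 ++ fillSeg st.2 ++ ["#"], []) else (st.1, st.2 ++ [c']))
      (out, seg)).2) = out ++ segA seg c := by
  intro c
  induction c with
  | nil => intro out seg; simp [segA]
  | cons x t ih =>
    intro out seg
    by_cases h : x = "#"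
    · simp only [List.foldl_cons, h, if_pos]
      rw [ih]
      simp [segA, List.append_assoc]
    · simp only [List.foldl_cons, if_neg h]
      rw [ih]
      simp [segA, h]

theorem colRoll_eq (col : List String) : colRoll col = segA [] col := by
  unfold colRoll
  simpa using colRoll_aux col [] []

theorem pyGetD_map_range {α : Type} (f : Nat → α) (n p : Nat) (d : α) (hp : p < n) :
    PySem.List.pyGetD ((List.range n).map f) (p : Int) d = f p := by
  rw [PySem.List.pyGetD_natCast, List.getD_eq_getElem _ _ (by simp [hp])]
  simp

-- ---- assembling both ports ----

theorem portA_eq_gPart (board : List (List String)) :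
    rollBoardSouth board = gPart board (PySem.List.pyGetD board (-1) []).length
      (PySem.List.pyGetD board (-1) []).length := by
  simp only [rollBoardSouth]
  rw [PySem.List.pyRange_zero_nat, ← gPart_zero]
  exact outerFold board _ _ (le_refl _)

theorem portB_eq_gPart (board : List (List String)) :
    rollBoardSouth_alt board = gPart board (PySem.List.pyGetD board (-1) []).length
      (PySem.List.pyGetD board (-1) []).length := by
  simp only [rollBoardSouth_alt]
  set w := (PySem.List.pyGetD board (-1) []).length with hw
  apply List.ext_getElem
  · simp [gPart]
  · intro m hm1 hm2
    have hmb : m < board.length := by simpa using hm1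
    simp only [List.getElem_map, List.getElem_range, gPart]
    apply List.ext_getElem
    · simp
    · intro p hp1 hp2
      have hpw : p < w := by simpa using hp1
      simp only [List.getElem_map, List.getElem_range]
      rw [pyGetD_map_range _ w p _ hpw, colRoll_eq, PySem.List.pyGetD_natCast]
      simp [hpw, resCol, extractCol]

theorem rollBoardSouth_spec : Claim_equal_rollBoardSouth := by
  intro board _ _
  unfold Spec_rollBoardSouth
  rw [portA_eq_gPart, portB_eq_gPart]
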